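-- pv_equiv track=rewrite | github.com/QuarKUS7/aoc2023 | 9/9.py | step
-- ===== SOURCE A (Python) =====
-- def step(seq, hist):
--     diff = []
--     for v in range(1, len(seq)):
--         diff.append(seq[v] - seq[v-1])
--     hist.append(diff)
--     if all(v == 0 for v in diff):
--         return hist
--     return step(diff, hist)
-- ===== SOURCE B (Python) =====
-- def step(seq, hist):
--     # Iterative re-implementation: replaces A's tail recursion with a while-loop
--     # and builds each difference row by zipping adjacent elements.
--     while True:
--         diff = [b - a for a, b in zip(seq, seq[1:])]
--         hist.append(diff)
--         if all(v == 0 for v in diff):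
--             return hist
--         seq = diff
-- ===== Notes on version B (the rewrite author's own statement) =====
-- stated objective: idiomatic
-- what changed: Tail recursion replaced by an iterative while-loop, and the index-based difference row (range over indices) replaced by zipping the sequence with its own tail.
import Mathlib
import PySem

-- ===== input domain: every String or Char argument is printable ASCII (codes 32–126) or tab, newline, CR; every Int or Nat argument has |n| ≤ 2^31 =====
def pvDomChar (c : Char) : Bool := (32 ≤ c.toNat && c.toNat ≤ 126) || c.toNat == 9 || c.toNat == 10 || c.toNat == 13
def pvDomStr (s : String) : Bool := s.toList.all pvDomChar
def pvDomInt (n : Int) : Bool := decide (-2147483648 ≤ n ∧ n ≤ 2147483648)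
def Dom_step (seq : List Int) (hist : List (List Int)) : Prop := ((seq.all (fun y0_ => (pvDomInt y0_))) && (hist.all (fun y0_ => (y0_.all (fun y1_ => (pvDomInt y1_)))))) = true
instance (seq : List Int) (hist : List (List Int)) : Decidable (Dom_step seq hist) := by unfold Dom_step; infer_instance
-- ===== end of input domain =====

-- B replaces A's tail recursion by an iterative loop and builds each difference row by
-- zipping the sequence with its own tail instead of indexing over range(1, len(seq));
-- both A and B mutate and return the caller's hist list in place (same side effect),
-- and the equivalence proved here is about the returned value.

-- ===== PORT A =====
-- length of A's diff row, cited by the port's decreasing_by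
theorem stepA_diff_len (seq : List Int) :
    ((PySem.List.pyRange 1 (seq.length : Int) 1).foldl
      (fun acc v => acc ++ [PySem.List.pyGetD seq v 0 - PySem.List.pyGetD seq (v - 1) 0]) []).length
      = ((seq.length : Int) - 1).toNat := by
  rw [PySem.List.foldl_append_singleton_eq_map]
  simp [PySem.List.length_pyRange_one]

def step (seq : List Int) (hist : List (List Int)) : List (List Int) :=
  let diff := (PySem.List.pyRange 1 (seq.length : Int) 1).foldl
    (fun acc v => acc ++ [PySem.List.pyGetD seq v 0 - PySem.List.pyGetD seq (v - 1) 0]) []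
  if h : diff.all (fun v => v == 0) then hist ++ [diff]
  else step diff (hist ++ [diff])
termination_by seq.length
decreasing_by
  rw [stepA_diff_len]
  have hlen : diff.length = ((seq.length : Int) - 1).toNat := stepA_diff_len seq
  have hne : diff ≠ [] := by
    intro hnil
    exact h (by simp [hnil])
  have : 0 < diff.length := List.length_pos_iff.mpr hne
  omega

-- ===== PORT B =====
-- diff = [b - a for a, b in zip(seq, seq[1:])]
def diffRow (seq : List Int) : List Int :=
  (seq.zip (PySem.List.slice seq (some 1) none)).map (fun p => p.2 - p.1)

theorem diffRow_len (seq : List Int) : (diffRow seq).length = seq.length - 1 := by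
  simp [diffRow, PySem.List.slice_from_one]

-- while True: diff = …; hist.append(diff); if all zero: return hist; seq = diff
def step_alt (seq : List Int) (hist : List (List Int)) : List (List Int) :=
  let diff := diffRow seq
  if h : diff.all (fun v => v == 0) then hist ++ [diff]
  else step_alt diff (hist ++ [diff])
termination_by seq.length
decreasing_by
  rw [diffRow_len]
  have hlen : diff.length = seq.length - 1 := diffRow_len seq
  have hne : diff ≠ [] := by
    intro hnil
    exact h (by simp [hnil])
  have : 0 < diff.length := List.length_pos_iff.mpr hne
  omega

-- ===== PRECONDITION & SPEC =====
def Spec_step (seq : List Int) (hist : List (List Int)) (out : List (List Int)) : Prop := out = step_alt seq hist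
instance (seq : List Int) (hist : List (List Int)) (out : List (List Int)) : Decidable (Spec_step seq hist out) := by unfold Spec_step; infer_instance

-- ===== CLAIM (what is proved, stated in full; the proofs are below) =====
def Claim_equal_step : Prop := ∀ (seq : List Int) (hist : List (List Int)), Dom_step seq hist → Spec_step seq hist (step seq hist)

-- ===== LEMMAS AND PROOFS =====

-- A's index-built difference row equals B's zip-built one.
theorem diff_eq (seq : List Int) :
    (PySem.List.pyRange 1 (seq.length : Int) 1).foldl
      (fun acc v => acc ++ [PySem.List.pyGetD seq v 0 - PySem.List.pyGetD seq (v - 1) 0]) []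
      = diffRow seq := by
  rw [PySem.List.foldl_append_singleton_eq_map, List.nil_append]
  apply List.ext_getElem
  · simp [diffRow, PySem.List.slice_from_one, PySem.List.length_pyRange_one]
  · intro k h1 h2
    have hk : k < seq.length - 1 := by
      have := PySem.List.length_pyRange_one 1 (seq.length : Int)
      simp [this] at h1; omega
    rw [List.getElem_map, PySem.List.getElem_pyRange_one]
    have hidx : (1 : Int) + (k : Int) = ((k + 1 : Nat) : Int) := by push_cast; ring
    rw [hidx]
    have h3 : ((k + 1 : Nat) : Int) - 1 = ((k : Nat) : Int) := by push_cast; ring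
    rw [h3, PySem.List.pyGetD_natCast, PySem.List.pyGetD_natCast]
    simp [diffRow, PySem.List.slice_from_one, List.getElem_zip, List.getElem_tail]
    rw [List.getElem?_eq_getElem (by omega), List.getElem?_eq_getElem (by omega)]
    simp

theorem step_eq_aux (n : Nat) : ∀ (seq : List Int) (hist : List (List Int)),
    seq.length = n → step seq hist = step_alt seq hist := by
  induction n using Nat.strong_induction_on with
  | _ n ih =>
    intro seq hist hn
    unfold step step_alt
    simp only [diff_eq seq]
    split_ifs with h
    · rfl
    · have hne : diffRow seq ≠ [] := by
        intro hnil
        exact h (by simp [hnil])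
      have hpos : 0 < (diffRow seq).length := List.length_pos_iff.mpr hne
      have hlt : (diffRow seq).length < n := by
        have := diffRow_len seq; omega
      exact ih _ hlt _ _ rfl

theorem step_eq_step_alt (seq : List Int) (hist : List (List Int)) :
    step seq hist = step_alt seq hist :=
  step_eq_aux seq.length seq hist rfl

-- ===== VERDICT (by name: the statement is the Claim_ definition above) =====
theorem step_spec : Claim_equal_step := by
  intro seq hist _
  unfold Spec_step
  exact step_eq_step_alt seq hist
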